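-- pv_equiv track=rewrite | github.com/TawfiqMoharaq/armonia.vercel.app | backend/main.py | _prune_history
-- ===== SOURCE A (Python) =====
-- from typing import Dict, List, Optional, Any
--
-- MAX_HISTORY_MESSAGES = 24
--
-- def _prune_history(history: List[Dict[str, str]]) -> List[Dict[str, str]]:
--     if not history:
--         return history
--     system_messages = [msg for msg in history if msg["role"] == "system"]
--     base_system = system_messages[0:1]
--     conversational = [msg for msg in history if msg["role"] != "system"]
--     trimmed = conversational[-MAX_HISTORY_MESSAGES:]
--     return base_system + trimmed
-- ===== SOURCE B (Python) =====
-- MAX_HISTORY_MESSAGES = 24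
--
-- def _prune_history(history):
--     # Single pass: remember the first system message and keep a sliding
--     # window of the last MAX_HISTORY_MESSAGES conversational messages.
--     if not history:
--         return history
--     base = None
--     window = []
--     for msg in history:
--         if msg["role"] == "system":
--             if base is None:
--                 base = msg
--         else:
--             window.append(msg)
--             if len(window) > MAX_HISTORY_MESSAGES:
--                 window.pop(0)
--     return ([base] if base is not None else []) + window
-- ===== Notes on version B (the rewrite author's own statement) =====
-- stated objective: alternative
-- what changed: Replaced the two filter comprehensions plus a [0:1] and a [-24:] slice by one fused pass that records the first system message and maintains a bounded sliding window of the last 24 conversational messages.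
import Mathlib
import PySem

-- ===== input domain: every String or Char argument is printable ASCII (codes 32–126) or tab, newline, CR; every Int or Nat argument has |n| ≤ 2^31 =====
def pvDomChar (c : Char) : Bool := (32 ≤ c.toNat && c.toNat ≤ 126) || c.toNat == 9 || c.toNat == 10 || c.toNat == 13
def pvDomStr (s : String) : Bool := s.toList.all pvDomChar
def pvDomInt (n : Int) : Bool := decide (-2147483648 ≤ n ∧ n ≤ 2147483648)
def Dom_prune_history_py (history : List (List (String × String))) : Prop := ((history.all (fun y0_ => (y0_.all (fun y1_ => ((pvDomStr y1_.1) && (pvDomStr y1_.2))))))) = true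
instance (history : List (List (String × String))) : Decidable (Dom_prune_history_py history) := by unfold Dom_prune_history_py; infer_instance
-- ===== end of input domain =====

-- B fuses A's two filter comprehensions and two slices into one pass with a
-- first-system register and a bounded sliding window (objective: alternative).

-- ===== PORT A =====
-- msg["role"] : first-match lookup in the association list (Python dict access)
def pvRole (msg : List (String × String)) : Option String := msg.lookup "role"

def prune_history_py (history : List (List (String × String))) : List (List (String × String)) :=
  if history = [] then history
  else
    let system_messages := history.filter (fun msg => pvRole msg == some "system")
    let base_system := PySem.List.slice system_messages (some 0) (some 1)
    let conversational := history.filter (fun msg => !(pvRole msg == some "system"))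
    let trimmed := PySem.List.slice conversational (some (-24)) none
    base_system ++ trimmed

-- ===== PORT B =====
def pvStep (st : Option (List (String × String)) × List (List (String × String)))
    (msg : List (String × String)) :
    Option (List (String × String)) × List (List (String × String)) :=
  if pvRole msg == some "system" then
    if st.1.isNone then (some msg, st.2) else st
  else
    let w := st.2 ++ [msg]
    (st.1, if 24 < w.length then w.tail else w)

def prune_history_py_alt (history : List (List (String × String))) : List (List (String × String)) :=
  if history = [] then history
  else
    let st := history.foldl pvStep (none, [])
    st.1.toList ++ st.2

-- ===== PRECONDITION & SPEC =====
-- Pre_ excludes messages without a "role" key, on which Python A raises KeyError.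
def Pre_prune_history_py (history : List (List (String × String))) : Prop :=
  ∀ msg ∈ history, (pvRole msg).isSome = true
instance (history : List (List (String × String))) : Decidable (Pre_prune_history_py history) := by unfold Pre_prune_history_py; infer_instance

def pvWitness_prune_history_py : (List (List (String × String))) :=
  [[("role", "system"), ("content", "be nice")],
   [("role", "user"), ("content", "hi")],
   [("role", "assistant"), ("content", "hello")]]

def Spec_prune_history_py (history : List (List (String × String))) (out : List (List (String × String))) : Prop := out = prune_history_py_alt history
instance (history : List (List (String × String))) (out : List (List (String × String))) : Decidable (Spec_prune_history_py history out) := by unfold Spec_prune_history_py; infer_instance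

-- ===== CLAIM (what is proved, stated in full; the proofs are below) =====
def Claim_equal_prune_history_py : Prop := ∀ (history : List (List (String × String))), Dom_prune_history_py history → Pre_prune_history_py history → Spec_prune_history_py history (prune_history_py history)

-- ===== LEMMAS AND PROOFS =====

-- last-24 suffix
def pvCap (xs : List (List (String × String))) : List (List (String × String)) :=
  xs.drop (xs.length - 24)

lemma pvCap_length_le (xs : List (List (String × String))) : (pvCap xs).length ≤ 24 := by
  simp [pvCap]; omega

lemma pvCap_idem_append (xs ys : List (List (String × String))) :
    pvCap (pvCap xs ++ ys) = pvCap (xs ++ ys) := by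
  by_cases h : xs.length ≤ 24
  · have : xs.length - 24 = 0 := by omega
    simp [pvCap, this]
  · have hx : xs = xs.take (xs.length - 24) ++ xs.drop (xs.length - 24) :=
      (List.take_append_drop _ _).symm
    simp only [pvCap]
    conv_rhs => rw [hx, List.append_assoc]
    rw [show (xs.take (xs.length - 24) ++ (xs.drop (xs.length - 24) ++ ys)).length
        = (xs.take (xs.length - 24)).length + (xs.drop (xs.length - 24) ++ ys).length
        from List.length_append,
      show (xs.take (xs.length - 24)).length + (xs.drop (xs.length - 24) ++ ys).length - 24
        = (xs.take (xs.length - 24)).length + ((xs.drop (xs.length - 24) ++ ys).length - 24) from by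
        simp; omega,
      List.drop_length_add_append]

lemma pvCap_of_len_le (xs : List (List (String × String))) (h : xs.length ≤ 24) :
    pvCap xs = xs := by
  have : xs.length - 24 = 0 := by omega
  simp [pvCap, this]

lemma pvStep_fst (l : List (List (String × String)))
    (b : Option (List (String × String))) (w : List (List (String × String))) :
    (l.foldl pvStep (b, w)).1
      = b.or (l.filter (fun msg => pvRole msg == some "system")).head? := by
  induction l generalizing b w with
  | nil => cases b <;> simp
  | cons m rest ih =>
    by_cases hm : pvRole m == some "system"
    · cases b with
      | none => simp [pvStep, hm, ih]
      | some x => simp [pvStep, hm, ih]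
    · simp only [List.foldl_cons, pvStep, hm]
      simp only [Bool.false_eq_true, if_false]
      rw [ih]
      simp [hm]

lemma pvStep_snd (l : List (List (String × String)))
    (b : Option (List (String × String))) (w : List (List (String × String)))
    (hw : w.length ≤ 24) :
    (l.foldl pvStep (b, w)).2
      = pvCap (w ++ l.filter (fun msg => !(pvRole msg == some "system"))) := by
  induction l generalizing b w with
  | nil => simp [pvCap_of_len_le w hw]
  | cons m rest ih =>
    by_cases hm : pvRole m == some "system"
    · cases b with
      | none => simpa [pvStep, hm] using ih (some m) w hw
      | some x => simpa [pvStep, hm] using ih (some x) w hw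
    · simp only [List.foldl_cons, pvStep, hm]
      simp only [Bool.false_eq_true, if_false]
      have hcap : (if 24 < (w ++ [m]).length then (w ++ [m]).tail else (w ++ [m]))
          = pvCap (w ++ [m]) := by
        by_cases h24 : 24 < (w ++ [m]).length
        · have hl : (w ++ [m]).length = 25 := by simp at h24 ⊢; omega
          rw [if_pos h24]
          simp only [pvCap, hl]
          rw [List.drop_one]
        · rw [if_neg h24, pvCap_of_len_le _ (by omega)]
      rw [hcap, ih b _ (pvCap_length_le _), pvCap_idem_append]
      simp [hm]

lemma pvSlice_take_one (xs : List (List (String × String))) :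
    PySem.List.slice xs (some 0) (some 1) = xs.head?.toList := by
  rw [PySem.List.slice_toNat xs (by norm_num) (by norm_num)]
  cases xs <;> simp

-- ===== VERDICT (by name: the statement is the Claim_ definition above) =====
theorem prune_history_py_spec : Claim_equal_prune_history_py := by
  intro history _ _
  unfold Spec_prune_history_py prune_history_py prune_history_py_alt
  by_cases h : history = []
  · simp [h]
  · simp only [h, if_false]
    rw [pvStep_fst, pvStep_snd _ _ _ (by simp)]
    rw [pvSlice_take_one,
      PySem.List.slice_from_neg_ofNat _ 24 (by norm_num)]
    simp [pvCap, Option.or]
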